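-- pv_equiv track=rewrite | github.com/jwalin-shah/tensor-logic | experiments/exp59_harder_hanoi.py | legal_neighbors
-- ===== SOURCE A (Python) =====
-- N_PEGS = 3
--
-- def top_disk(state, peg):
--     for d, p in enumerate(state):
--         if p == peg:
--             return d
--     return None
--
-- def legal_neighbors(state):
--     out = []
--     N = len(state)
--     for p1 in range(N_PEGS):
--         d = top_disk(state, p1)
--         if d is None:
--             continue
--         for p2 in range(N_PEGS):
--             if p2 == p1:
--                 continue
--             top_p2 = top_disk(state, p2)
--             if top_p2 is None or top_p2 > d:
--                 s2 = list(state)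
--                 s2[d] = p2
--                 out.append((d, p1, p2, tuple(s2)))
--     return out
-- ===== SOURCE B (Python) =====
-- N_PEGS = 3
--
-- def legal_neighbors(state):
--     # Single pass over the disks, smallest first: the first disk seen on a peg is
--     # that peg's top, and a destination peg is legal for it exactly when no
--     # smaller disk has appeared on that peg yet.  Moves are collected per source
--     # peg and the buckets concatenated in peg order at the end.
--     buckets = [None] * N_PEGS
--     seen = set()
--     for d, p in enumerate(state):
--         if 0 <= p < N_PEGS and p not in seen:
--             prefix, suffix = tuple(state[:d]), tuple(state[d + 1:])
--             buckets[p] = [(d, p, p2, prefix + (p2,) + suffix)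
--                           for p2 in range(N_PEGS)
--                           if p2 != p and p2 not in seen]
--             seen.add(p)
--     out = []
--     for b in buckets:
--         if b is not None:
--             out.extend(b)
--     return out
-- ===== Notes on version B (the rewrite author's own statement) =====
-- stated objective: alternative
-- what changed: B replaces A's nested source/destination peg loops with repeated top_disk scans by a single pass over the disks (smallest first): the first disk seen on a peg is its top and a destination is legal iff no smaller disk has appeared on it yet; moves are collected into per-peg buckets concatenated at the end.
import Mathlib
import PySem

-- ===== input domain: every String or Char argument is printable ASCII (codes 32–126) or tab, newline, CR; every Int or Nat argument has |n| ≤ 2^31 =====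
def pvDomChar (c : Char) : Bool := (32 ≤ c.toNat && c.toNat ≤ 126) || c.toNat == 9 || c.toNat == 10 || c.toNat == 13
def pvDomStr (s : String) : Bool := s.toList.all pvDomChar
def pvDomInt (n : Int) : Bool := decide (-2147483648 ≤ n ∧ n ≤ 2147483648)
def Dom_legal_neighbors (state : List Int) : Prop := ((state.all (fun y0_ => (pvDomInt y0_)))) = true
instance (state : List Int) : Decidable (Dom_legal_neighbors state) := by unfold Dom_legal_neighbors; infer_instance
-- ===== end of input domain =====

-- B replaces A's nested peg loops with repeated top_disk scans by one pass over the disks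
-- (smallest first) that buckets the legal moves per source peg; return values proved equal on all inputs.

-- ===== PORT A =====
-- top_disk(state, peg): first index whose peg equals `peg`
def topAux (d : Int) (l : List Int) (peg : Int) : Option Int :=
  match l with
  | [] => none
  | p :: rest => if p = peg then some d else topAux (d + 1) rest peg

def top_disk (state : List Int) (peg : Int) : Option Int := topAux 0 state peg

def legal_neighbors (state : List Int) : List (Int × Int × Int × List Int) :=
  (PySem.List.pyRange 0 3 1).foldl (fun out p1 =>
    match top_disk state p1 with
    | none => out
    | some d =>
      (PySem.List.pyRange 0 3 1).foldl (fun out2 p2 =>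
        if p2 = p1 then out2
        else
          match top_disk state p2 with
          | none => out2 ++ [(d, p1, p2, state.set d.toNat p2)]   -- d from enumerate: 0 ≤ d < len, so List.set is exact for s2[d] = p2
          | some t2 =>
            if t2 > d then out2 ++ [(d, p1, p2, state.set d.toNat p2)] else out2) out) []

-- ===== PORT B =====
-- the list comprehension over p2 in range(N_PEGS)
def mkMoves (state : List Int) (d q : Int) (blocked : Int → Bool) :
    List (Int × Int × Int × List Int) :=
  ((PySem.List.pyRange 0 3 1).filter (fun p2 => !(p2 == q) && !(blocked p2))).map
    -- d is the enumerate counter, 0 ≤ d, so take/drop are exact for state[:d] and state[d+1:]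
    (fun p2 => (d, q, p2, state.take d.toNat ++ [p2] ++ state.drop (d.toNat + 1)))

-- for d, p in enumerate(state): if 0 <= p < N_PEGS and p not in seen: buckets[p] = [...]; seen.add(p)
def lnBucketsAux (state : List Int) (seen : PySem.Set Int) (d : Int) (l : List Int)
    (buckets : List (Option (List (Int × Int × Int × List Int)))) :
    List (Option (List (Int × Int × Int × List Int))) :=
  match l with
  | [] => buckets
  | p :: rest =>
    if (decide (0 ≤ p) && decide (p < 3)) && !(seen.contains p) then
      lnBucketsAux state (PySem.Set.add seen p) (d + 1) rest
        (buckets.set p.toNat (some (mkMoves state d p (fun p2 => seen.contains p2))))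
    else lnBucketsAux state seen (d + 1) rest buckets

def legal_neighbors_alt (state : List Int) : List (Int × Int × Int × List Int) :=
  (lnBucketsAux state PySem.Set.empty 0 state (List.replicate 3 none)).foldl
    (fun out b => match b with | none => out | some ms => out ++ ms) []

-- ===== PRECONDITION & SPEC =====
def Spec_legal_neighbors (state : List Int) (out : List (Int × Int × Int × List Int)) : Prop := out = legal_neighbors_alt state
instance (state : List Int) (out : List (Int × Int × Int × List Int)) : Decidable (Spec_legal_neighbors state out) := by unfold Spec_legal_neighbors; infer_instance

-- ===== CLAIM (what is proved, stated in full; the proofs are below) =====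
def Claim_equal_legal_neighbors : Prop := ∀ (state : List Int), Dom_legal_neighbors state → Spec_legal_neighbors state (legal_neighbors state)

-- ===== LEMMAS AND PROOFS =====

theorem topAux_some_ge {l : List Int} : ∀ {d q t : Int}, topAux d l q = some t → d ≤ t := by
  induction l with
  | nil => intro d q t h; simp [topAux] at h
  | cons p rest ih =>
    intro d q t h
    simp only [topAux] at h
    split at h
    · injection h with h; omega
    · have := ih h; omega

theorem topAux_inj {l : List Int} : ∀ {d q1 q2 t : Int},
    topAux d l q1 = some t → topAux d l q2 = some t → q1 = q2 := by
  induction l with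
  | nil => intro d q1 q2 t h; simp [topAux] at h
  | cons p rest ih =>
    intro d q1 q2 t h1 h2
    simp only [topAux] at h1 h2
    split at h1 <;> split at h2
    · rename_i e1 e2; rw [← e1, ← e2]
    · exfalso; injection h1 with h1; have := topAux_some_ge h2; omega
    · exfalso; injection h2 with h2; have := topAux_some_ge h1; omega
    · exact ih h1 h2

theorem topAux_some_get {l : List Int} : ∀ {d q t : Int}, topAux d l q = some t →
    0 ≤ d → ((t - d).toNat < l.length ∧ l[(t - d).toNat]? = some q) := by
  induction l with
  | nil => intro d q t h; simp [topAux] at h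
  | cons p rest ih =>
    intro d q t h hd
    simp only [topAux] at h
    split at h
    · rename_i hpq
      injection h with h
      have h0 : (t - d).toNat = 0 := by omega
      refine ⟨by simp [h0], ?_⟩
      rw [h0]
      simp [hpq]
    · have hge := topAux_some_ge h
      obtain ⟨h1, h2⟩ := ih h (by omega)
      have hk : (t - d).toNat = (t - (d + 1)).toNat + 1 := by omega
      refine ⟨by simp; omega, ?_⟩
      rw [hk]
      simpa using h2

-- per-bucket value of lnBucketsAux
def Fb (state : List Int) (seen : PySem.Set Int) (d : Int) (l : List Int) (q : Int)
    (b : Option (List (Int × Int × Int × List Int))) :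
    Option (List (Int × Int × Int × List Int)) :=
  if seen.contains q then b
  else
    match topAux d l q with
    | none => b
    | some dq =>
      some (mkMoves state dq q (fun p2 =>
        seen.contains p2 ||
          match topAux d l p2 with
          | none => false
          | some t => decide (t < dq)))

theorem contains_add_eq (s : PySem.Set Int) (x y : Int) :
    PySem.Set.contains (PySem.Set.add s x) y = (PySem.Set.contains s y || y == x) := by
  by_cases h : y ∈ PySem.Set.add s x
  · rw [(PySem.Set.contains_iff _ _).2 h]
    rw [PySem.Set.mem_add] at h
    rcases h with h | h
    · rw [(PySem.Set.contains_iff _ _).2 h]; rfl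
    · simp [h]
  · have h' := h
    rw [PySem.Set.mem_add] at h'
    push_neg at h'
    have c1 : PySem.Set.contains (PySem.Set.add s x) y = false := by
      cases hc : PySem.Set.contains (PySem.Set.add s x) y
      · rfl
      · exact absurd ((PySem.Set.contains_iff _ _).1 hc) h
    have c2 : PySem.Set.contains s y = false := by
      cases hc : PySem.Set.contains s y
      · rfl
      · exact absurd ((PySem.Set.contains_iff _ _).1 hc) h'.1
    simp [c1, c2, h'.2]

theorem mkMoves_congr (state : List Int) (d q : Int) (f g : Int → Bool)
    (h : ∀ p2 : Int, 0 ≤ p2 → p2 < 3 → p2 ≠ q → f p2 = g p2) :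
    mkMoves state d q f = mkMoves state d q g := by
  unfold mkMoves
  congr 1
  apply List.filter_congr
  intro x hx
  rw [PySem.List.mem_pyRange_one] at hx
  by_cases hq : x = q
  · simp [hq]
  · simp [hq, h x hx.1 hx.2 hq]

theorem Fb_step (state : List Int) (seen : PySem.Set Int) (d p q : Int) (rest : List Int)
    (b : Option (List (Int × Int × Int × List Int)))
    (hp0 : 0 ≤ p) (hp3 : p < 3) (hps : seen.contains p = false) :
    Fb state (PySem.Set.add seen p) (d + 1) rest q
      (if q = p then some (mkMoves state d p (fun p2 => seen.contains p2)) else b)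
    = Fb state seen d (p :: rest) q b := by
  by_cases hqp : q = p
  · subst hqp
    rw [if_pos rfl]
    unfold Fb
    have hca : PySem.Set.contains (PySem.Set.add seen q) q = true := by
      rw [contains_add_eq]; simp
    rw [hca, if_pos rfl, hps]
    rw [if_neg (by simp)]
    have ht : topAux d (q :: rest) q = some d := by simp [topAux]
    rw [ht]
    show some (mkMoves state d q _) = some (mkMoves state d q _)
    refine congrArg some (mkMoves_congr state d q _ _ ?_)
    intro p2 hp2a hp2b hp2q
    have h2 : topAux d (q :: rest) p2 = topAux (d + 1) rest p2 := by
      simp only [topAux]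
      rw [if_neg (fun he => hp2q he.symm)]
    cases htp : topAux (d + 1) rest p2 with
    | none => rw [h2, htp]; simp
    | some t =>
      have hged := topAux_some_ge htp
      rw [h2, htp]
      have hdec : decide (t < d) = false := by simp; omega
      simp [hdec]
  · rw [if_neg hqp]
    unfold Fb
    have hca : PySem.Set.contains (PySem.Set.add seen p) q = PySem.Set.contains seen q := by
      rw [contains_add_eq]
      have hb : (q == p) = false := by simp [hqp]
      simp [hb]
    rw [hca]
    cases hcq : PySem.Set.contains seen q with
    | true => rw [if_pos rfl, if_pos rfl]
    | false =>
      rw [if_neg (by simp), if_neg (by simp)]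
      have ht : topAux d (p :: rest) q = topAux (d + 1) rest q := by
        simp only [topAux]
        rw [if_neg (fun he => hqp he.symm)]
      rw [ht]
      cases htq : topAux (d + 1) rest q with
      | none => rfl
      | some dq =>
        have hdq := topAux_some_ge htq
        show some (mkMoves state dq q _) = some (mkMoves state dq q _)
        refine congrArg some (mkMoves_congr state dq q _ _ ?_)
        intro p2 hp2a hp2b hp2q
        by_cases hpp : p2 = p
        · subst hpp
          have h1 : PySem.Set.contains (PySem.Set.add seen p2) p2 = true := by
            rw [contains_add_eq]; simp
          have h2 : topAux d (p2 :: rest) p2 = some d := by simp [topAux]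
          rw [h1, h2, hps]
          have hdec : decide (d < dq) = true := by simp; omega
          simp [hdec]
        · have h1 : PySem.Set.contains (PySem.Set.add seen p) p2 = PySem.Set.contains seen p2 := by
            rw [contains_add_eq]
            have hb : (p2 == p) = false := by simp [hpp]
            simp [hb]
          have h2 : topAux d (p :: rest) p2 = topAux (d + 1) rest p2 := by
            simp only [topAux]
            rw [if_neg (fun he => hpp he.symm)]
          rw [h1, h2]

theorem Fb_skip (state : List Int) (seen : PySem.Set Int) (d p q : Int) (rest : List Int)
    (b : Option (List (Int × Int × Int × List Int)))
    (h : ¬(0 ≤ p ∧ p < 3) ∨ seen.contains p = true)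
    (hq0 : 0 ≤ q) (hq3 : q < 3) :
    Fb state seen (d + 1) rest q b = Fb state seen d (p :: rest) q b := by
  simp only [Fb]
  cases hcq : PySem.Set.contains seen q with
  | true => simp
  | false =>
    simp only [Bool.false_eq_true, if_false]
    have hqp : q ≠ p := by
      intro he
      subst he
      rcases h with h | h
      · exact h ⟨hq0, hq3⟩
      · rw [h] at hcq; cases hcq
    have ht : topAux d (p :: rest) q = topAux (d + 1) rest q := by
      simp only [topAux]
      rw [if_neg (fun he => hqp he.symm)]
    rw [ht]
    cases htq : topAux (d + 1) rest q with
    | none => rfl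
    | some dq =>
      have hdq := topAux_some_ge htq
      show some (mkMoves state dq q _) = some (mkMoves state dq q _)
      refine congrArg some (mkMoves_congr state dq q _ _ ?_)
      intro p2 hp2a hp2b hp2q
      by_cases hpp : p2 = p
      · subst hpp
        rcases h with h | h
        · exact absurd ⟨hp2a, hp2b⟩ h
        · rw [h]; simp
      · have h2 : topAux d (p :: rest) p2 = topAux (d + 1) rest p2 := by
          simp only [topAux]
          rw [if_neg (fun he => hpp he.symm)]
        rw [h2]

theorem lnBucketsAux_eq (state : List Int) (l : List Int) :
    ∀ (seen : PySem.Set Int) (d : Int)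
      (b0 b1 b2 : Option (List (Int × Int × Int × List Int))),
    lnBucketsAux state seen d l [b0, b1, b2] =
      [Fb state seen d l 0 b0, Fb state seen d l 1 b1, Fb state seen d l 2 b2] := by
  induction l with
  | nil =>
    intro seen d b0 b1 b2
    simp only [lnBucketsAux, Fb, topAux]
    cases PySem.Set.contains seen 0 <;> cases PySem.Set.contains seen 1 <;>
      cases PySem.Set.contains seen 2 <;> simp
  | cons p rest ih =>
    intro seen d b0 b1 b2
    simp only [lnBucketsAux]
    by_cases hb : ((decide (0 ≤ p) && decide (p < 3)) && !(seen.contains p)) = true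
    · rw [if_pos hb]
      simp only [Bool.and_eq_true, Bool.not_eq_eq_eq_not, Bool.not_true, decide_eq_true_eq] at hb
      obtain ⟨⟨hp0, hp3⟩, hps⟩ := hb
      set mv := mkMoves state d p (fun p2 => seen.contains p2) with hmv
      have hp : p = 0 ∨ p = 1 ∨ p = 2 := by omega
      rcases hp with rfl | rfl | rfl
      · show lnBucketsAux state _ _ _ [some mv, b1, b2] = _
        rw [ih]
        have e0 := Fb_step state seen d 0 0 rest b0 hp0 hp3 hps
        rw [if_pos rfl] at e0
        have e1 := Fb_step state seen d 0 1 rest b1 hp0 hp3 hps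
        rw [if_neg (by norm_num)] at e1
        have e2 := Fb_step state seen d 0 2 rest b2 hp0 hp3 hps
        rw [if_neg (by norm_num)] at e2
        rw [e0, e1, e2]
      · show lnBucketsAux state _ _ _ [b0, some mv, b2] = _
        rw [ih]
        have e0 := Fb_step state seen d 1 0 rest b0 hp0 hp3 hps
        rw [if_neg (by norm_num)] at e0
        have e1 := Fb_step state seen d 1 1 rest b1 hp0 hp3 hps
        rw [if_pos rfl] at e1
        have e2 := Fb_step state seen d 1 2 rest b2 hp0 hp3 hps
        rw [if_neg (by norm_num)] at e2
        rw [e0, e1, e2]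
      · show lnBucketsAux state _ _ _ [b0, b1, some mv] = _
        rw [ih]
        have e0 := Fb_step state seen d 2 0 rest b0 hp0 hp3 hps
        rw [if_neg (by norm_num)] at e0
        have e1 := Fb_step state seen d 2 1 rest b1 hp0 hp3 hps
        rw [if_neg (by norm_num)] at e1
        have e2 := Fb_step state seen d 2 2 rest b2 hp0 hp3 hps
        rw [if_pos rfl] at e2
        rw [e0, e1, e2]
    · rw [if_neg hb]
      rw [ih]
      have h' : ¬(0 ≤ p ∧ p < 3) ∨ seen.contains p = true := by
        by_cases h1 : (0 ≤ p ∧ p < 3)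
        · cases hc : seen.contains p with
          | true => exact Or.inr rfl
          | false =>
            exfalso
            apply hb
            simp only [Bool.and_eq_true, decide_eq_true_eq, Bool.not_eq_true']
            exact ⟨⟨h1.1, h1.2⟩, hc⟩
        · exact Or.inl h1
      rw [Fb_skip state seen d p 0 rest b0 h' (by omega) (by omega),
          Fb_skip state seen d p 1 rest b1 h' (by omega) (by omega),
          Fb_skip state seen d p 2 rest b2 h' (by omega) (by omega)]

-- A's per-source-peg move list
def gA (state : List Int) (p1 : Int) : List (Int × Int × Int × List Int) :=
  match top_disk state p1 with
  | none => []
  | some d =>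
    ((PySem.List.pyRange 0 3 1).filter (fun p2 =>
        !(p2 == p1) &&
          match top_disk state p2 with
          | none => true
          | some t2 => decide (t2 > d))).map
      (fun p2 => (d, p1, p2, state.set d.toNat p2))

theorem inner_foldl_eq (state : List Int) (p1 d : Int) (out : List (Int × Int × Int × List Int)) :
    (PySem.List.pyRange 0 3 1).foldl (fun out2 p2 =>
        if p2 = p1 then out2
        else
          match top_disk state p2 with
          | none => out2 ++ [(d, p1, p2, state.set d.toNat p2)]
          | some t2 =>
            if t2 > d then out2 ++ [(d, p1, p2, state.set d.toNat p2)] else out2) out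
    = out ++ ((PySem.List.pyRange 0 3 1).filter (fun p2 =>
        !(p2 == p1) &&
          match top_disk state p2 with
          | none => true
          | some t2 => decide (t2 > d))).map
        (fun p2 => (d, p1, p2, state.set d.toNat p2)) := by
  rw [← PySem.List.foldl_append_if
        (fun p2 =>
          !(p2 == p1) &&
            match top_disk state p2 with
            | none => true
            | some t2 => decide (t2 > d))
        (fun p2 => (d, p1, p2, state.set d.toNat p2))]
  apply PySem.List.foldl_congr_mem
  intro acc x _
  by_cases hx : x = p1
  · simp [hx]
  · have hbx : (x == p1) = false := by simp [hx]
    rw [if_neg hx]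
    cases ht : top_disk state x with
    | none => simp [hbx]
    | some t2 =>
      by_cases h2 : t2 > d
      · simp [hbx, h2]
      · simp [hbx, h2]

set_option maxHeartbeats 1000000 in
theorem legal_neighbors_eq_gA (state : List Int) :
    legal_neighbors state = gA state 0 ++ gA state 1 ++ gA state 2 := by
  have hr : PySem.List.pyRange 0 3 1 = [0, 1, 2] := by decide
  unfold legal_neighbors
  simp only [inner_foldl_eq]
  rw [hr]
  simp only [List.foldl_cons, List.foldl_nil]
  unfold gA
  cases h0 : top_disk state 0 <;> cases h1 : top_disk state 1 <;> cases h2 : top_disk state 2 <;>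
    simp [hr, List.append_assoc]

-- B's extension step as an append
def eB (b : Option (List (Int × Int × Int × List Int))) : List (Int × Int × Int × List Int) :=
  match b with | none => [] | some ms => ms

theorem gA_eq_eB_Fb (state : List Int) (q : Int) :
    eB (Fb state PySem.Set.empty 0 state q none) = gA state q := by
  unfold Fb gA eB top_disk
  have hce : ∀ y : Int, PySem.Set.contains PySem.Set.empty y = false := by
    intro y
    cases hc : PySem.Set.contains PySem.Set.empty y
    · rfl
    · exact absurd ((PySem.Set.contains_iff _ _).1 hc) (by simp [PySem.Set.empty])
  rw [hce]
  simp only [Bool.false_eq_true, if_false]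
  cases hq : topAux 0 state q with
  | none => rfl
  | some dq =>
    simp only
    unfold mkMoves
    have hlen : dq.toNat < state.length ∧ state[dq.toNat]? = some q := by
      have := topAux_some_get hq (by omega)
      simpa using this
    have hfil : ∀ x ∈ PySem.List.pyRange 0 3 1,
        (!(x == q) && !(PySem.Set.contains PySem.Set.empty x ||
            match topAux 0 state x with
            | none => false
            | some t => decide (t < dq)))
        = (!(x == q) &&
            match topAux 0 state x with
            | none => true
            | some t2 => decide (t2 > dq)) := by
      intro x _
      by_cases hxq : x = q
      · simp [hxq]
      · have hbx : (x == q) = false := by simp [hxq]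
        rw [hce]
        cases htx : topAux 0 state x with
        | none => simp [hbx]
        | some t =>
          have hne : t ≠ dq := fun he => hxq (topAux_inj (he ▸ htx) hq)
          have : decide (t < dq) = !decide (t > dq) := by
            by_cases h : t < dq <;> simp [h] <;> omega
          simp [hbx, this]
    rw [List.filter_congr hfil]
    apply List.map_congr_left
    intro x _
    have hset : state.set dq.toNat x = state.take dq.toNat ++ x :: state.drop (dq.toNat + 1) := by
      rw [List.set_eq_take_append_cons_drop, if_pos hlen.1]
    simp [hset]

theorem alt_eq (state : List Int) :
    legal_neighbors_alt state =
      eB (Fb state PySem.Set.empty 0 state 0 none) ++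
      eB (Fb state PySem.Set.empty 0 state 1 none) ++
      eB (Fb state PySem.Set.empty 0 state 2 none) := by
  unfold legal_neighbors_alt
  have hrep : (List.replicate 3 (none : Option (List (Int × Int × Int × List Int)))) =
      [none, none, none] := rfl
  rw [hrep, lnBucketsAux_eq]
  simp only [List.foldl_cons, List.foldl_nil]
  cases Fb state PySem.Set.empty 0 state 0 none <;>
    cases Fb state PySem.Set.empty 0 state 1 none <;>
    cases Fb state PySem.Set.empty 0 state 2 none <;>
    simp [eB]

-- ===== VERDICT (by name: the statement is the Claim_ definition above) =====
theorem legal_neighbors_spec : Claim_equal_legal_neighbors := by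
  intro state _
  unfold Spec_legal_neighbors
  rw [legal_neighbors_eq_gA, alt_eq, gA_eq_eB_Fb, gA_eq_eB_Fb, gA_eq_eB_Fb]
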